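-- pv_equiv track=rewrite | github.com/kotama7/AI-Scientist-v2-HPC | ai_scientist/treesearch/utils/phase_plan.py | wrap_sources_for_display
-- ===== SOURCE A (Python) =====
-- from typing import Any, Dict, List, Tuple, Optional
--
-- def _get_lang_for_path(path: str) -> str:
--     """Return the appropriate language identifier for code blocks based on file extension."""
--     path_lower = path.lower()
--     filename = path_lower.split('/')[-1]
--
--     # Python
--     if path_lower.endswith('.py'):
--         return "python"
--     # C
--     if path_lower.endswith('.c'):
--         return "c"
--     # C++
--     if path_lower.endswith(('.cpp', '.cc', '.cxx', '.hpp', '.hxx')):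
--         return "cpp"
--     # C/C++ headers
--     if path_lower.endswith('.h'):
--         return "c"
--     # Makefile
--     if filename == 'makefile' or filename.startswith('makefile.') or filename.endswith('.mk'):
--         return "makefile"
--     # Shell
--     if path_lower.endswith(('.sh', '.bash', '.zsh')):
--         return "bash"
--     # YAML
--     if path_lower.endswith(('.yaml', '.yml')):
--         return "yaml"
--     # JSON
--     if path_lower.endswith('.json'):
--         return "json"
--     # Fortran
--     if path_lower.endswith(('.f', '.f90', '.f95', '.for')):
--         return "fortran"
--     # Default
--     return ""
--
-- def wrap_sources_for_display(files: List[Dict[str, Any]]) -> str: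
--     """Build a readable string with each file wrapped in its own appropriately-typed code block."""
--     parts: list[str] = []
--     for entry in files:
--         path = entry.get('path', '')
--         content = entry.get('content', '')
--         lang = _get_lang_for_path(path)
--         parts.append(f"```{lang}\n// File: {path}\n{content}\n```")
--     return "\n\n".join(parts)
-- ===== SOURCE B (Python) =====
-- from typing import Any, Dict, List
--
-- # Single extension→language table instead of A's endswith cascade.
-- _EXT_LANG = {
--     'py': 'python', 'c': 'c',
--     'cpp': 'cpp', 'cc': 'cpp', 'cxx': 'cpp', 'hpp': 'cpp', 'hxx': 'cpp',
--     'h': 'c',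
--     'sh': 'bash', 'bash': 'bash', 'zsh': 'bash',
--     'yaml': 'yaml', 'yml': 'yaml', 'json': 'json',
--     'f': 'fortran', 'f90': 'fortran', 'f95': 'fortran', 'for': 'fortran',
-- }
-- # Extensions that outrank the Makefile filename rules (they precede it in A's cascade).
-- _BEFORE_MAKEFILE = frozenset(('py', 'c', 'cpp', 'cc', 'cxx', 'hpp', 'hxx', 'h'))
--
-- def _lang(path: str) -> str:
--     p = path.lower()
--     ext = p.rsplit('.', 1)[1] if '.' in p else ''
--     if ext in _BEFORE_MAKEFILE:
--         return _EXT_LANG[ext]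
--     name = p.split('/')[-1]
--     if name == 'makefile' or name.startswith('makefile.') or name.endswith('.mk'):
--         return 'makefile'
--     return _EXT_LANG.get(ext, '')
--
-- def wrap_sources_for_display(files: List[Dict[str, Any]]) -> str:
--     return "\n\n".join(
--         "```{}\n// File: {}\n{}\n```".format(
--             _lang(e.get('path', '')), e.get('path', ''), e.get('content', ''))
--         for e in files
--     )
-- ===== Notes on version B (the rewrite author's own statement) =====
-- stated objective: idiomatic
-- what changed: Instead of A's 18-branch endswith cascade, B extracts the extension after the last '.' once (rsplit) and classifies it with a single extension-to-language dict lookup, with the Makefile filename rules kept as one explicit branch placed after the extensions that outrank them; the output is built by join over a generator instead of an accumulator-list loop.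
import Mathlib
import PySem

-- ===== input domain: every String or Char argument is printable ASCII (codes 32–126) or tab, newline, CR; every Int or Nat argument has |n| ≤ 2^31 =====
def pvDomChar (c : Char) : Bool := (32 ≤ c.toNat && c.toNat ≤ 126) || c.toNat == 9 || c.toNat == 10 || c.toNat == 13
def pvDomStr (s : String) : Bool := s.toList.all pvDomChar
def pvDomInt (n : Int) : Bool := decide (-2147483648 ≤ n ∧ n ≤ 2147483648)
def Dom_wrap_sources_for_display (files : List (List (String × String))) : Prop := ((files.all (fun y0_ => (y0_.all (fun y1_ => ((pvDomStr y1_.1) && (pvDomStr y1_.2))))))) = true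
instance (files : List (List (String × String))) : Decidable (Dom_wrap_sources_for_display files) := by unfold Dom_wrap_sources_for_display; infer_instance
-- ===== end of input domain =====

-- B classifies by extracting the extension after the last '.' once and looking it up in an
-- extension→language dict (the Makefile filename rules stay an explicit branch, checked after the
-- extensions that outrank them in A's cascade); objective: idiomatic, not faster.

-- ===== PORT A =====
-- _get_lang_for_path, transliterated branch for branch
def pvLangA (path : String) : String :=
  let path_lower := PySem.Str.lower path
  let filename := ((PySem.Str.split? path_lower "/").getD []).getLastD ""
  if PySem.Str.endswith path_lower ".py" then "python"
  else if PySem.Str.endswith path_lower ".c" then "c"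
  else if PySem.Str.endswith path_lower ".cpp" || PySem.Str.endswith path_lower ".cc" ||
          PySem.Str.endswith path_lower ".cxx" || PySem.Str.endswith path_lower ".hpp" ||
          PySem.Str.endswith path_lower ".hxx" then "cpp"
  else if PySem.Str.endswith path_lower ".h" then "c"
  else if filename == "makefile" || PySem.Str.startswith filename "makefile." ||
          PySem.Str.endswith filename ".mk" then "makefile"
  else if PySem.Str.endswith path_lower ".sh" || PySem.Str.endswith path_lower ".bash" ||
          PySem.Str.endswith path_lower ".zsh" then "bash"
  else if PySem.Str.endswith path_lower ".yaml" || PySem.Str.endswith path_lower ".yml" then "yaml"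
  else if PySem.Str.endswith path_lower ".json" then "json"
  else if PySem.Str.endswith path_lower ".f" || PySem.Str.endswith path_lower ".f90" ||
          PySem.Str.endswith path_lower ".f95" || PySem.Str.endswith path_lower ".for" then "fortran"
  else ""

def wrap_sources_for_display (files : List (List (String × String))) : String :=
  let parts := files.foldl (fun parts entry =>
    let path := (PySem.Dict.mk entry).getD "path" ""
    let content := (PySem.Dict.mk entry).getD "content" ""
    let lang := pvLangA path
    parts ++ ["```" ++ lang ++ "\n// File: " ++ path ++ "\n" ++ content ++ "\n```"]) []
  PySem.Str.join "\n\n" parts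

-- ===== PORT B =====
-- _EXT_LANG: one extension→language dict (keys as char lists, PySem's string carrier)
def pvExtLang : PySem.Dict (List Char) String :=
  PySem.Dict.mk
    [("py".toList, "python"), ("c".toList, "c"),
     ("cpp".toList, "cpp"), ("cc".toList, "cpp"), ("cxx".toList, "cpp"),
     ("hpp".toList, "cpp"), ("hxx".toList, "cpp"), ("h".toList, "c"),
     ("sh".toList, "bash"), ("bash".toList, "bash"), ("zsh".toList, "bash"),
     ("yaml".toList, "yaml"), ("yml".toList, "yaml"), ("json".toList, "json"),
     ("f".toList, "fortran"), ("f90".toList, "fortran"), ("f95".toList, "fortran"),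
     ("for".toList, "fortran")]

-- _BEFORE_MAKEFILE: extensions that outrank the Makefile filename rules
def pvBeforeMakefile : List (List Char) :=
  ["py".toList, "c".toList, "cpp".toList, "cc".toList, "cxx".toList,
   "hpp".toList, "hxx".toList, "h".toList]

-- ext = p.rsplit('.', 1)[1] if '.' in p else '' — exact: rsplit('.', 1)[1] is the maximal
-- '.'-free suffix of p, i.e. the reversed '.'-free prefix of the reversed string.
def pvExtOf (p : List Char) : List Char :=
  if PySem.Chars.isIn ['.'] p then (p.reverse.takeWhile (· ≠ '.')).reverse else []

-- _lang, transliteration of Source B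
def pvLangB (path : String) : String :=
  let p := PySem.Str.lower path
  let ext := pvExtOf p.toList
  if pvBeforeMakefile.contains ext then pvExtLang.getD ext ""
  else
    let name := ((PySem.Str.split? p "/").getD []).getLastD ""
    if name == "makefile" || PySem.Str.startswith name "makefile." ||
       PySem.Str.endswith name ".mk" then "makefile"
    else pvExtLang.getD ext ""

def wrap_sources_for_display_alt (files : List (List (String × String))) : String :=
  PySem.Str.join "\n\n" (files.map (fun e =>
    let path := (PySem.Dict.mk e).getD "path" ""
    "```" ++ pvLangB path ++ "\n// File: " ++ path ++ "\n" ++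
      (PySem.Dict.mk e).getD "content" "" ++ "\n```"))

-- ===== PRECONDITION & SPEC =====
def Spec_wrap_sources_for_display (files : List (List (String × String))) (out : String) : Prop := out = wrap_sources_for_display_alt files
instance (files : List (List (String × String))) (out : String) : Decidable (Spec_wrap_sources_for_display files out) := by unfold Spec_wrap_sources_for_display; infer_instance

-- ===== CLAIM (what is proved, stated in full; the proofs are below) =====
def Claim_equal_wrap_sources_for_display : Prop := ∀ (files : List (List (String × String))), Dom_wrap_sources_for_display files → Spec_wrap_sources_for_display files (wrap_sources_for_display files)

-- ===== LEMMAS AND PROOFS =====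
-- takeWhile of "everything before c" against a prefix ending in c
theorem pvTakeWhile_prefix_char (c : Char) (re r : List Char) (hc : c ∉ re) (hm : c ∈ r) :
    r.takeWhile (· ≠ c) = re ↔ re ++ [c] <+: r := by
  constructor
  · intro h
    have hne : r.dropWhile (· ≠ c) ≠ [] := by
      intro hnil
      have := List.takeWhile_append_dropWhile (p := fun x => decide (x ≠ c)) (l := r)
      rw [hnil, List.append_nil, h] at this
      exact hc (this ▸ hm)
    obtain ⟨x, xs, hx⟩ := List.exists_cons_of_ne_nil hne
    have hx' : x = c := by
      have hh := List.head_dropWhile_not (fun x => decide (x ≠ c)) hne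
      simp only [hx, List.head_cons] at hh
      simpa using hh
    have hsplit := List.takeWhile_append_dropWhile (p := fun x => decide (x ≠ c)) (l := r)
    rw [h, hx, hx'] at hsplit
    exact ⟨xs, by rw [← hsplit]; simp⟩
  · rintro ⟨t, ht⟩
    subst ht
    induction re with
    | nil => simp
    | cons a as ih =>
      have ha : a ≠ c := fun h => hc (h ▸ List.mem_cons_self)
      have hc' : c ∉ as := fun h => hc (List.mem_cons_of_mem _ h)
      have hm' : c ∈ as ++ [c] ++ t := by simp
      rw [List.cons_append, List.cons_append, List.takeWhile_cons]
      simp only [ha, decide_not, ne_eq]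
      simpa using ih hc' hm'

-- the extension test IS the endswith test: for a nonempty '.'-free key e,
-- pvExtOf p == e exactly when p ends with '.' ++ e
theorem pvExt_eq_endswith (p e : List Char) (he : e ≠ []) (hd : '.' ∉ e) :
    (pvExtOf p == e) = PySem.Chars.endswith p ('.' :: e) := by
  rw [Bool.eq_iff_iff, beq_iff_eq, PySem.Chars.endswith_iff]
  unfold pvExtOf
  by_cases hm : ('.' : Char) ∈ p
  · have hin : PySem.Chars.isIn ['.'] p = true := by
      rw [PySem.Chars.isIn_iff_infix]
      exact (List.singleton_infix_iff _ _).mpr hm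
    rw [if_pos hin]
    have hm' : ('.' : Char) ∈ p.reverse := List.mem_reverse.mpr hm
    have hd' : ('.' : Char) ∉ e.reverse := fun h => hd (List.mem_reverse.mp h)
    constructor
    · intro h
      have h' : p.reverse.takeWhile (· ≠ '.') = e.reverse := by
        rw [← h, List.reverse_reverse]
      have h2 := (pvTakeWhile_prefix_char '.' e.reverse p.reverse hd' hm').mp h'
      exact List.reverse_prefix.mp (by simpa using h2)
    · intro h
      have h' : (e.reverse ++ ['.']) <+: p.reverse := by
        simpa using List.reverse_prefix.mpr h
      rw [(pvTakeWhile_prefix_char '.' e.reverse p.reverse hd' hm').mpr h']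
      simp
  · have hin : PySem.Chars.isIn ['.'] p = false := by
      rw [PySem.Chars.isIn_eq_false_iff]
      intro h
      exact hm ((List.singleton_infix_iff _ _).mp h)
    rw [if_neg (by simp [hin])]
    constructor
    · intro h; exact absurd h.symm he
    · intro h; exact absurd (h.mem (by simp)) hm

-- the value of B's dict lookup as a function of the 18 key tests (proof-side helper)
def pvT (g1 g2 g3 g4 g5 g6 g7 g8 d1 d2 d3 d4 d5 d6 d7 d8 d9 d10 : Bool) : String :=
  if g1 then "python" else if g2 then "c" else if g3 then "cpp" else if g4 then "cpp"
  else if g5 then "cpp" else if g6 then "cpp" else if g7 then "cpp" else if g8 then "c"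
  else if d1 then "bash" else if d2 then "bash" else if d3 then "bash"
  else if d4 then "yaml" else if d5 then "yaml" else if d6 then "json"
  else if d7 then "fortran" else if d8 then "fortran" else if d9 then "fortran"
  else if d10 then "fortran" else ""

-- the boolean skeleton: A's cascade vs B's priority-test + dict lookup
theorem pvChain_eq (g1 g2 g3 g4 g5 g6 g7 g8 m d1 d2 d3 d4 d5 d6 d7 d8 d9 d10 : Bool) :
    (if g1 then "python" else if g2 then "c"
     else if g3 || g4 || g5 || g6 || g7 then "cpp"
     else if g8 then "c"
     else if m then "makefile"
     else if d1 || d2 || d3 then "bash"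
     else if d4 || d5 then "yaml"
     else if d6 then "json"
     else if d7 || d8 || d9 || d10 then "fortran"
     else "")
    = (if g1 || (g2 || (g3 || (g4 || (g5 || (g6 || (g7 || g8)))))) then pvT g1 g2 g3 g4 g5 g6 g7 g8 d1 d2 d3 d4 d5 d6 d7 d8 d9 d10
       else if m then "makefile"
       else pvT g1 g2 g3 g4 g5 g6 g7 g8 d1 d2 d3 d4 d5 d6 d7 d8 d9 d10) := by
  cases g1 <;> cases g2 <;> cases g3 <;> cases g4 <;> cases g5 <;> cases g6 <;> cases g7 <;>
    cases g8 <;> cases m <;> simp [pvT]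
  all_goals cases d1 <;> cases d2 <;> cases d3 <;> cases d4 <;> cases d5 <;> cases d6 <;>
    cases d7 <;> cases d8 <;> cases d9 <;> simp

theorem pvGetD_eq (x : List Char) :
    pvExtLang.getD x "" = pvT ("py".toList == x) ("c".toList == x) ("cpp".toList == x) ("cc".toList == x) ("cxx".toList == x) ("hpp".toList == x) ("hxx".toList == x) ("h".toList == x) ("sh".toList == x) ("bash".toList == x) ("zsh".toList == x) ("yaml".toList == x) ("yml".toList == x) ("json".toList == x) ("f".toList == x) ("f90".toList == x) ("f95".toList == x) ("for".toList == x) := by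
  simp only [pvExtLang, PySem.Dict.getD, PySem.Dict.get?, List.find?_cons]
  cases ("py".toList == x) with
  | true => rfl
  | false =>
    cases ("c".toList == x) with
    | true => rfl
    | false =>
      cases ("cpp".toList == x) with
      | true => rfl
      | false =>
        cases ("cc".toList == x) with
        | true => rfl
        | false =>
          cases ("cxx".toList == x) with
          | true => rfl
          | false =>
            cases ("hpp".toList == x) with
            | true => rfl
            | false =>
              cases ("hxx".toList == x) with
              | true => rfl
              | false =>
                cases ("h".toList == x) with
                | true => rfl
                | false =>
                  cases ("sh".toList == x) with
                  | true => rfl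
                  | false =>
                    cases ("bash".toList == x) with
                    | true => rfl
                    | false =>
                      cases ("zsh".toList == x) with
                      | true => rfl
                      | false =>
                        cases ("yaml".toList == x) with
                        | true => rfl
                        | false =>
                          cases ("yml".toList == x) with
                          | true => rfl
                          | false =>
                            cases ("json".toList == x) with
                            | true => rfl
                            | false =>
                              cases ("f".toList == x) with
                              | true => rfl
                              | false =>
                                cases ("f90".toList == x) with
                                | true => rfl
                                | false =>
                                  cases ("f95".toList == x) with
                                  | true => rfl
                                  | false =>
                                    cases ("for".toList == x) with
                                    | true => rfl
                                    | false =>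
                                      rfl

theorem pvLang_eq (path : String) : pvLangA path = pvLangB path := by
  simp only [pvLangA, pvLangB, PySem.Str.endswith_eq, PySem.Str.toList_lower, pvBeforeMakefile,
    List.contains_cons, pvGetD_eq, List.contains_nil, Bool.or_false]
  simp only [Bool.beq_comm (a := pvExtOf (PySem.Chars.lower path.toList))]
  have e1 : ("py".toList == pvExtOf (PySem.Chars.lower path.toList)) = PySem.Chars.endswith (PySem.Chars.lower path.toList) ".py".toList := by
    rw [Bool.beq_comm]; exact pvExt_eq_endswith _ _ (by decide) (by decide)
  have e2 : ("c".toList == pvExtOf (PySem.Chars.lower path.toList)) = PySem.Chars.endswith (PySem.Chars.lower path.toList) ".c".toList := by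
    rw [Bool.beq_comm]; exact pvExt_eq_endswith _ _ (by decide) (by decide)
  have e3 : ("cpp".toList == pvExtOf (PySem.Chars.lower path.toList)) = PySem.Chars.endswith (PySem.Chars.lower path.toList) ".cpp".toList := by
    rw [Bool.beq_comm]; exact pvExt_eq_endswith _ _ (by decide) (by decide)
  have e4 : ("cc".toList == pvExtOf (PySem.Chars.lower path.toList)) = PySem.Chars.endswith (PySem.Chars.lower path.toList) ".cc".toList := by
    rw [Bool.beq_comm]; exact pvExt_eq_endswith _ _ (by decide) (by decide)
  have e5 : ("cxx".toList == pvExtOf (PySem.Chars.lower path.toList)) = PySem.Chars.endswith (PySem.Chars.lower path.toList) ".cxx".toList := by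
    rw [Bool.beq_comm]; exact pvExt_eq_endswith _ _ (by decide) (by decide)
  have e6 : ("hpp".toList == pvExtOf (PySem.Chars.lower path.toList)) = PySem.Chars.endswith (PySem.Chars.lower path.toList) ".hpp".toList := by
    rw [Bool.beq_comm]; exact pvExt_eq_endswith _ _ (by decide) (by decide)
  have e7 : ("hxx".toList == pvExtOf (PySem.Chars.lower path.toList)) = PySem.Chars.endswith (PySem.Chars.lower path.toList) ".hxx".toList := by
    rw [Bool.beq_comm]; exact pvExt_eq_endswith _ _ (by decide) (by decide)
  have e8 : ("h".toList == pvExtOf (PySem.Chars.lower path.toList)) = PySem.Chars.endswith (PySem.Chars.lower path.toList) ".h".toList := by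
    rw [Bool.beq_comm]; exact pvExt_eq_endswith _ _ (by decide) (by decide)
  have e9 : ("sh".toList == pvExtOf (PySem.Chars.lower path.toList)) = PySem.Chars.endswith (PySem.Chars.lower path.toList) ".sh".toList := by
    rw [Bool.beq_comm]; exact pvExt_eq_endswith _ _ (by decide) (by decide)
  have e10 : ("bash".toList == pvExtOf (PySem.Chars.lower path.toList)) = PySem.Chars.endswith (PySem.Chars.lower path.toList) ".bash".toList := by
    rw [Bool.beq_comm]; exact pvExt_eq_endswith _ _ (by decide) (by decide)
  have e11 : ("zsh".toList == pvExtOf (PySem.Chars.lower path.toList)) = PySem.Chars.endswith (PySem.Chars.lower path.toList) ".zsh".toList := by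
    rw [Bool.beq_comm]; exact pvExt_eq_endswith _ _ (by decide) (by decide)
  have e12 : ("yaml".toList == pvExtOf (PySem.Chars.lower path.toList)) = PySem.Chars.endswith (PySem.Chars.lower path.toList) ".yaml".toList := by
    rw [Bool.beq_comm]; exact pvExt_eq_endswith _ _ (by decide) (by decide)
  have e13 : ("yml".toList == pvExtOf (PySem.Chars.lower path.toList)) = PySem.Chars.endswith (PySem.Chars.lower path.toList) ".yml".toList := by
    rw [Bool.beq_comm]; exact pvExt_eq_endswith _ _ (by decide) (by decide)
  have e14 : ("json".toList == pvExtOf (PySem.Chars.lower path.toList)) = PySem.Chars.endswith (PySem.Chars.lower path.toList) ".json".toList := by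
    rw [Bool.beq_comm]; exact pvExt_eq_endswith _ _ (by decide) (by decide)
  have e15 : ("f".toList == pvExtOf (PySem.Chars.lower path.toList)) = PySem.Chars.endswith (PySem.Chars.lower path.toList) ".f".toList := by
    rw [Bool.beq_comm]; exact pvExt_eq_endswith _ _ (by decide) (by decide)
  have e16 : ("f90".toList == pvExtOf (PySem.Chars.lower path.toList)) = PySem.Chars.endswith (PySem.Chars.lower path.toList) ".f90".toList := by
    rw [Bool.beq_comm]; exact pvExt_eq_endswith _ _ (by decide) (by decide)
  have e17 : ("f95".toList == pvExtOf (PySem.Chars.lower path.toList)) = PySem.Chars.endswith (PySem.Chars.lower path.toList) ".f95".toList := by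
    rw [Bool.beq_comm]; exact pvExt_eq_endswith _ _ (by decide) (by decide)
  have e18 : ("for".toList == pvExtOf (PySem.Chars.lower path.toList)) = PySem.Chars.endswith (PySem.Chars.lower path.toList) ".for".toList := by
    rw [Bool.beq_comm]; exact pvExt_eq_endswith _ _ (by decide) (by decide)
  simp only [e1, e2, e3, e4, e5, e6, e7, e8, e9, e10, e11, e12, e13, e14, e15, e16, e17, e18]
  exact pvChain_eq _ _ _ _ _ _ _ _ _ _ _ _ _ _ _ _ _ _ _

theorem wrap_sources_for_display_eq (files : List (List (String × String))) :
    wrap_sources_for_display files = wrap_sources_for_display_alt files := by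
  unfold wrap_sources_for_display wrap_sources_for_display_alt
  rw [PySem.List.foldl_append_singleton_eq_map]
  simp only [pvLang_eq, List.nil_append]

-- ===== VERDICT (by name: the statement is the Claim_ definition above) =====
theorem wrap_sources_for_display_spec : Claim_equal_wrap_sources_for_display := by
  intro files _
  unfold Spec_wrap_sources_for_display
  exact wrap_sources_for_display_eq files
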